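-- pv_equiv track=rewrite | github.com/monzag/Codecool-Management-System | views/view.py | create_data_row
-- ===== SOURCE A (Python) =====
-- def find_max_string_length(table, item_index, title_list):
--     '''
--     Finds longest string from all items of a given column index.
--
--     Args:
--         table (list) - list of lists of all the strings
--         item_index (int) - specific index in lists in table
--         title_list (list) - list containing table headers
--
--     Returns:
--         int - longest length value for a given index
--     '''
--
--     longest_string = ''
--
--     for a_list in table:
--         if len(str(a_list[item_index])) > len(longest_string):
--             longest_string = str(a_list[item_index])
--
--     if len(str(title_list[item_index])) > len(longest_string):
--         longest_string = str(title_list[item_index])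
--
--     return len(longest_string)
--
-- def create_data_row(table, list_index, title_list, MIN_COLUMN_WIDTH, CELL_PADDING, is_title=False):
--     '''
--     Generates a string to be later printed as a row with data in a table.
--
--     Args:
--         table (list) - list of lists of all the strings
--         list_index (int) - index of a specific row (list) in a table
--         title_list (list) - list containing table headers
--         MIN_COLUMN_WIDTH (int)
--         CELL_PADDING (int)
--         is_title: boolean (if True, creates title row, if False, creates data row)
--
--     Returns:
--         data_row: string ready to be printed
--     '''
--
--     data_row = '|'
--
--     for column in range(len(table[list_index])):
--         max_string_length = find_max_string_length(table, column, title_list)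
--         if max_string_length >= MIN_COLUMN_WIDTH:
--             cell_width = max_string_length + CELL_PADDING
--         else:
--             cell_width = MIN_COLUMN_WIDTH
--
--         if is_title == False:
--             data_row = data_row + (table[list_index][column].center(cell_width, ' ')) + '|'
--         else:
--             data_row = data_row + (title_list[column].center(cell_width, ' ')) + '|'
--
--     return data_row
-- ===== SOURCE B (Python) =====
-- def create_data_row(table, list_index, title_list, MIN_COLUMN_WIDTH, CELL_PADDING, is_title=False):
--     ncols = len(table[list_index])
--     maxes = [len(t) for t in title_list[:ncols]]
--     for r in table:
--         maxes = [max(m, len(c)) for m, c in zip(maxes, r)]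
--     widths = [m + CELL_PADDING if m >= MIN_COLUMN_WIDTH else MIN_COLUMN_WIDTH for m in maxes]
--     src = title_list if is_title else table[list_index]
--     cells = [s.center(w, ' ') for s, w in zip(src, widths)]
--     return '|' + '|'.join(cells) + '|' if cells else '|'
-- ===== Notes on version B (the rewrite author's own statement) =====
-- stated objective: alternative
-- what changed: B swaps the traversal order: instead of A's column-major nested scan (for each column, a helper rescans every row tracking the longest string, interleaved with string concatenation), B makes one row-major pass folding each row into a running width vector (pointwise max via zip), then assembles the row with a single join.
import Mathlib
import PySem

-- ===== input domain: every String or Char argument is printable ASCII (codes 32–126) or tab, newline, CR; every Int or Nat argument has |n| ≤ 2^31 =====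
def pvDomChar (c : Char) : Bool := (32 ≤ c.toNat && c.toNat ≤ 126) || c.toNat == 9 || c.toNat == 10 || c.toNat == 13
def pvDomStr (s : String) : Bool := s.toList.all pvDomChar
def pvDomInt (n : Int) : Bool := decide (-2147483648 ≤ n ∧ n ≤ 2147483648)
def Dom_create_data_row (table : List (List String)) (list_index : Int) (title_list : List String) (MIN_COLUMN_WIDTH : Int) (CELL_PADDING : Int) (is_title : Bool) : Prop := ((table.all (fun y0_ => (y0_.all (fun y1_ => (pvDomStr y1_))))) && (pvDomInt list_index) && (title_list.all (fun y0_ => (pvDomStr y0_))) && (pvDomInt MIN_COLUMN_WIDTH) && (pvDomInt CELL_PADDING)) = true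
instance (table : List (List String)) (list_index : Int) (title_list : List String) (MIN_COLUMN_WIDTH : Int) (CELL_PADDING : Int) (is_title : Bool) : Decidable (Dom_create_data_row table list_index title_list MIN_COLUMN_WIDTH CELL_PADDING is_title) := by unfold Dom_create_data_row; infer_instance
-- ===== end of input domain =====

-- ===== PORT A =====
-- B replaces A's column-major nested scan (a longest-string rescan of all rows per column,
-- interleaved with concatenation) by one row-major pass updating a width vector, then a join.

-- exact port of CPython str.center(width, ' ') on code points (left = marg//2 + (marg & width & 1))
def pvCenter (s : List Char) (width : Int) : List Char :=
  if width ≤ (s.length : Int) then s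
  else
    let marg : Int := width - (s.length : Int)
    let left : Int := marg / 2 + (if marg % 2 = 1 ∧ width % 2 = 1 then 1 else 0)
    List.replicate left.toNat ' ' ++ s ++ List.replicate (marg - left).toNat ' '

def find_max_string_length (table : List (List String)) (item_index : Int) (title_list : List String) : Int :=
  let longest := table.foldl (fun longest a_list =>
    if longest.length < ((PySem.List.pyGet? a_list item_index).getD "").toList.length
    then ((PySem.List.pyGet? a_list item_index).getD "").toList else longest) []
  let longest := if longest.length < ((PySem.List.pyGet? title_list item_index).getD "").toList.length
    then ((PySem.List.pyGet? title_list item_index).getD "").toList else longest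
  (longest.length : Int)

def create_data_row (table : List (List String)) (list_index : Int) (title_list : List String) (MIN_COLUMN_WIDTH : Int) (CELL_PADDING : Int) (is_title : Bool) : String :=
  let row := (PySem.List.pyGet? table list_index).getD []
  String.mk ((List.range row.length).foldl (fun (data_row : List Char) (column : Nat) =>
    let max_string_length := find_max_string_length table (column : Int) title_list
    let cell_width := if max_string_length ≥ MIN_COLUMN_WIDTH then max_string_length + CELL_PADDING else MIN_COLUMN_WIDTH
    if is_title = false then
      data_row ++ pvCenter ((PySem.List.pyGet? row (column : Int)).getD "").toList cell_width ++ ['|']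
    else
      data_row ++ pvCenter ((PySem.List.pyGet? title_list (column : Int)).getD "").toList cell_width ++ ['|']) ['|'])

-- ===== PORT B =====
-- one row-major step: pointwise max of the running width vector with this row's cell lengths
def updateMaxes (maxes : List Int) (r : List String) : List Int :=
  (maxes.zip r).map (fun p => max p.1 (p.2.toList.length : Int))

def create_data_row_alt (table : List (List String)) (list_index : Int) (title_list : List String) (MIN_COLUMN_WIDTH : Int) (CELL_PADDING : Int) (is_title : Bool) : String :=
  let ncols := ((PySem.List.pyGet? table list_index).getD []).length
  let maxes0 := (PySem.List.slice title_list none (some (ncols : Int))).map (fun t => (t.toList.length : Int))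
  let maxes := table.foldl updateMaxes maxes0
  let widths := maxes.map (fun m => if m ≥ MIN_COLUMN_WIDTH then m + CELL_PADDING else MIN_COLUMN_WIDTH)
  let src := if is_title then title_list else (PySem.List.pyGet? table list_index).getD []
  let cells := (src.zip widths).map (fun p => pvCenter p.1.toList p.2)
  if cells.isEmpty then "|" else String.mk (['|'] ++ List.intercalate ['|'] cells ++ ['|'])

-- ===== PRECONDITION & SPEC =====
-- Pre_ excludes exactly the inputs where Python A raises IndexError: an invalid list_index,
-- or (for a nonempty selected row) a row or title_list shorter than the selected row.
def Pre_create_data_row (table : List (List String)) (list_index : Int) (title_list : List String) (MIN_COLUMN_WIDTH : Int) (CELL_PADDING : Int) (is_title : Bool) : Prop :=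
  (match PySem.List.pyGet? table list_index with
   | none => false
   | some row => row.isEmpty || (table.all (fun r => decide (row.length ≤ r.length)) && decide (row.length ≤ title_list.length))) = true
instance (table : List (List String)) (list_index : Int) (title_list : List String) (MIN_COLUMN_WIDTH : Int) (CELL_PADDING : Int) (is_title : Bool) : Decidable (Pre_create_data_row table list_index title_list MIN_COLUMN_WIDTH CELL_PADDING is_title) := by unfold Pre_create_data_row; infer_instance

def pvWitness_create_data_row : List (List String) × Int × List String × Int × Int × Bool :=
  ([["ab", "c"], ["d", "efg"]], 0, ["T1", "T2"], 4, 1, false)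

def Spec_create_data_row (table : List (List String)) (list_index : Int) (title_list : List String) (MIN_COLUMN_WIDTH : Int) (CELL_PADDING : Int) (is_title : Bool) (out : String) : Prop := out = create_data_row_alt table list_index title_list MIN_COLUMN_WIDTH CELL_PADDING is_title
instance (table : List (List String)) (list_index : Int) (title_list : List String) (MIN_COLUMN_WIDTH : Int) (CELL_PADDING : Int) (is_title : Bool) (out : String) : Decidable (Spec_create_data_row table list_index title_list MIN_COLUMN_WIDTH CELL_PADDING is_title out) := by unfold Spec_create_data_row; infer_instance

-- ===== CLAIM (what is proved, stated in full; the proofs are below) =====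
def Claim_equal_create_data_row : Prop := ∀ (table : List (List String)) (list_index : Int) (title_list : List String) (MIN_COLUMN_WIDTH : Int) (CELL_PADDING : Int) (is_title : Bool), Dom_create_data_row table list_index title_list MIN_COLUMN_WIDTH CELL_PADDING is_title → Pre_create_data_row table list_index title_list MIN_COLUMN_WIDTH CELL_PADDING is_title → Spec_create_data_row table list_index title_list MIN_COLUMN_WIDTH CELL_PADDING is_title (create_data_row table list_index title_list MIN_COLUMN_WIDTH CELL_PADDING is_title)

-- ===== LEMMAS AND PROOFS =====

-- A's longest-string tracking computes the running max of lengths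
lemma foldl_longest_len (l : List (List Char)) (acc : List Char) :
    (l.foldl (fun longest s => if longest.length < s.length then s else longest) acc).length
      = l.foldl (fun m s => max m s.length) acc.length := by
  induction l generalizing acc with
  | nil => rfl
  | cons h t ih =>
    simp only [List.foldl_cons]
    by_cases hc : acc.length < h.length
    · rw [if_pos hc, ih]; congr 1; omega
    · rw [if_neg hc, ih]; congr 1; omega

lemma foldl_max_cast (l : List (List String)) (g : List String → Nat) (a : Nat) :
    ((l.foldl (fun m r => max m (g r)) a : Nat) : Int)
      = l.foldl (fun m r => max m ((g r : Nat) : Int)) (a : Int) := by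
  induction l generalizing a with
  | nil => rfl
  | cons h t ih =>
    simp only [List.foldl_cons, ih]
    congr 1
    omega

-- A's helper = max of the title length and the row-wise fold of lengths, over Int
lemma fmsl_eq (table : List (List String)) (title_list : List String) (c : Nat) :
    find_max_string_length table (c : Int) title_list
      = max ((((PySem.List.pyGet? title_list (c : Int)).getD "").toList.length : Int))
            (table.foldl (fun m r => max m (((PySem.List.pyGet? r (c : Int)).getD "").toList.length : Int)) 0) := by
  unfold find_max_string_length
  have hfold : (table.foldl (fun longest a_list =>
      if longest.length < ((PySem.List.pyGet? a_list (c : Int)).getD "").toList.length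
      then ((PySem.List.pyGet? a_list (c : Int)).getD "").toList else longest) []).length
      = table.foldl (fun m r => max m ((PySem.List.pyGet? r (c : Int)).getD "").toList.length) 0 := by
    have := foldl_longest_len (table.map (fun a_list => ((PySem.List.pyGet? a_list (c : Int)).getD "").toList)) []
    simpa [List.foldl_map] using this
  have hcast := foldl_max_cast table (fun r => ((PySem.List.pyGet? r (c : Int)).getD "").toList.length) 0
  rw [Nat.cast_zero] at hcast
  by_cases hc : (table.foldl (fun longest a_list =>
      if longest.length < ((PySem.List.pyGet? a_list (c : Int)).getD "").toList.length
      then ((PySem.List.pyGet? a_list (c : Int)).getD "").toList else longest) []).length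
      < ((PySem.List.pyGet? title_list (c : Int)).getD "").toList.length <;>
  · simp only [hc, if_true, if_false]
    rw [← hcast, ← hfold]
    omega

-- pulling a max out of a max-fold initial value
lemma foldl_max_init (l : List (List String)) (f : List String → Int) (a b : Int) :
    l.foldl (fun m r => max m (f r)) (max a b) = max a (l.foldl (fun m r => max m (f r)) b) := by
  induction l generalizing b with
  | nil => rfl
  | cons h t ih =>
    simp only [List.foldl_cons]
    rw [max_assoc, ih]

lemma updateMaxes_length (maxes : List Int) (r : List String) (h : maxes.length ≤ r.length) :
    (updateMaxes maxes r).length = maxes.length := by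
  simp [updateMaxes]; omega

lemma updateMaxes_getD (maxes : List Int) (r : List String) (c : Nat)
    (hc : c < maxes.length) (h : maxes.length ≤ r.length) :
    (updateMaxes maxes r).getD c 0
      = max (maxes.getD c 0) (((PySem.List.pyGet? r (c : Int)).getD "").toList.length : Int) := by
  have hcr : c < r.length := by omega
  have hlen : (updateMaxes maxes r).length = maxes.length := updateMaxes_length maxes r h
  rw [List.getD_eq_getElem _ _ (by omega), List.getD_eq_getElem _ _ hc]
  simp [updateMaxes, PySem.List.pyGet?_natCast, List.getElem?_eq_getElem hcr]

lemma foldl_updateMaxes_length (table : List (List String)) (maxes : List Int)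
    (h : ∀ r ∈ table, maxes.length ≤ r.length) :
    (table.foldl updateMaxes maxes).length = maxes.length := by
  induction table generalizing maxes with
  | nil => rfl
  | cons r t ih =>
    simp only [List.foldl_cons]
    rw [ih _ (by intro x hx; rw [updateMaxes_length _ _ (h r (by simp))]; exact h x (by simp [hx])),
      updateMaxes_length _ _ (h r (by simp))]

lemma foldl_updateMaxes_getD (table : List (List String)) (maxes : List Int) (c : Nat)
    (hc : c < maxes.length) (h : ∀ r ∈ table, maxes.length ≤ r.length) :
    (table.foldl updateMaxes maxes).getD c 0
      = table.foldl (fun m r => max m (((PySem.List.pyGet? r (c : Int)).getD "").toList.length : Int)) (maxes.getD c 0) := by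
  induction table generalizing maxes with
  | nil => rfl
  | cons r t ih =>
    simp only [List.foldl_cons]
    have hr : maxes.length ≤ r.length := h r (by simp)
    have hlen : (updateMaxes maxes r).length = maxes.length := updateMaxes_length maxes r hr
    rw [ih _ (by omega) (by intro x hx; rw [hlen]; exact h x (by simp [hx])),
      updateMaxes_getD maxes r c hc hr]

lemma foldl_updateMaxes_nil (table : List (List String)) :
    table.foldl updateMaxes [] = [] := by
  induction table with
  | nil => rfl
  | cons r t ih => simpa [updateMaxes] using ih

lemma intercalate_bar (cells : List (List Char)) (h : cells ≠ []) :
    List.intercalate ['|'] cells ++ ['|'] = cells.flatMap (fun c => c ++ ['|']) := by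
  induction cells with
  | nil => simp at h
  | cons c cs ih =>
    cases cs with
    | nil => simp [List.intercalate]
    | cons d ds =>
      rw [List.flatMap_cons, ← ih (by simp)]
      simp [List.intercalate, List.intersperse_cons₂]

-- ===== VERDICT (by name: the statement is the Claim_ definition above) =====
theorem create_data_row_spec : Claim_equal_create_data_row := by
  intro table list_index title_list MIN CP is_title _ hpre
  unfold Spec_create_data_row
  unfold Pre_create_data_row at hpre
  cases hget : PySem.List.pyGet? table list_index with
  | none => rw [hget] at hpre; simp at hpre
  | some row =>
  rw [hget] at hpre
  simp only [create_data_row, create_data_row_alt, hget, Option.getD_some]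
  have hslice0 : PySem.List.slice title_list none (some (0 : Int)) = [] := by
    have := PySem.List.slice_to_natCast (xs := title_list) (b := 0)
    simpa using this
  rcases List.eq_nil_or_concat' row with hrow | ⟨row', x, hrow⟩
  · subst hrow
    simp [hslice0, foldl_updateMaxes_nil]
    rfl
  have hne : row ≠ [] := by subst hrow; simp
  simp only [Bool.or_eq_true, Bool.and_eq_true, List.all_eq_true, decide_eq_true_eq,
    List.isEmpty_iff, hne, false_or] at hpre
  obtain ⟨hrows, htl⟩ := hpre
  set n := row.length with hn
  -- the initial width vector: title lengths, one per column
  have hm0len : ((PySem.List.slice title_list none (some (n : Int))).map (fun t => (t.toList.length : Int))).length = n := by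
    rw [PySem.List.slice_to_natCast]
    simp [htl]
  have hm0getD : ∀ c < n, ((PySem.List.slice title_list none (some (n : Int))).map (fun t => (t.toList.length : Int))).getD c 0
      = (((PySem.List.pyGet? title_list (c : Int)).getD "").toList.length : Int) := by
    intro c hc
    rw [List.getD_eq_getElem _ _ (by omega)]
    have hct : c < title_list.length := by omega
    simp [PySem.List.slice_to_natCast, PySem.List.pyGet?_natCast, List.getElem?_eq_getElem hct,
      List.getElem_take]
  set maxes := table.foldl updateMaxes ((PySem.List.slice title_list none (some (n : Int))).map (fun t => (t.toList.length : Int))) with hmaxes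
  have hmlen : maxes.length = n := by
    rw [hmaxes, foldl_updateMaxes_length _ _ (by intro r hr; rw [hm0len]; exact hrows r hr), hm0len]
  have hmgetD : ∀ c < n, maxes.getD c 0
      = max ((((PySem.List.pyGet? title_list (c : Int)).getD "").toList.length : Int))
            (table.foldl (fun m r => max m (((PySem.List.pyGet? r (c : Int)).getD "").toList.length : Int)) 0) := by
    intro c hc
    rw [hmaxes, foldl_updateMaxes_getD _ _ c (by omega) (by intro r hr; rw [hm0len]; exact hrows r hr),
      hm0getD c hc]
    have : (((PySem.List.pyGet? title_list (c : Int)).getD "").toList.length : Int)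
        = max ((((PySem.List.pyGet? title_list (c : Int)).getD "").toList.length : Int)) 0 := by
      omega
    rw [this, foldl_max_init, ← this]
  set widths := maxes.map (fun m => if m ≥ MIN then m + CP else MIN) with hwidths
  have hwlen : widths.length = n := by rw [hwidths]; simp [hmlen]
  -- widths.getD c = A's cell width for column c
  have hwgetD : ∀ c < n, widths.getD c 0
      = (if find_max_string_length table (c : Int) title_list ≥ MIN
         then find_max_string_length table (c : Int) title_list + CP else MIN) := by
    intro c hc
    rw [hwidths, List.getD_eq_getElem _ _ (by simp [hmlen]; omega), List.getElem_map,
      ← List.getD_eq_getElem _ 0 (by omega), hmgetD c hc, fmsl_eq]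
  set src := if is_title then title_list else row with hsrc
  have hsrclen : n ≤ src.length := by
    rw [hsrc]; cases is_title <;> simp <;> omega
  -- the B-side cell list, written as a map over column indices
  have hcells : (src.zip widths).map (fun p => pvCenter p.1.toList p.2)
      = (List.range n).map (fun (c : Nat) => pvCenter ((PySem.List.pyGet? src (c : Int)).getD "").toList (widths.getD c 0)) := by
    apply List.ext_getElem
    · simp [hwlen]; omega
    · intro i h1 h2
      have hi : i < n := by simpa using h2
      have hisrc : i < src.length := by omega
      simp [List.getElem_zip, PySem.List.pyGet?_natCast, List.getElem?_eq_getElem hisrc,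
        List.getElem_map, List.getElem_range,
        List.getElem?_eq_getElem (show i < widths.length by omega),
        List.getD_eq_getElem _ _ (show i < widths.length by omega)]
  have hcne : (src.zip widths).map (fun p => pvCenter p.1.toList p.2) ≠ [] := by
    rw [hcells]
    have : 0 < n := List.length_pos_of_ne_nil hne
    cases hq : List.range n with
    | nil => exfalso; have := List.length_range (n := n) ▸ congrArg List.length hq; simp at this; omega
    | cons a l => simp [hq]
  rw [if_neg (by simpa using hcne)]
  congr 1
  refine Eq.trans (PySem.List.foldl_congr_mem _ _
    (fun (d : List Char) (c : Nat) =>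
      d ++ (pvCenter ((PySem.List.pyGet? src (c : Int)).getD "").toList (widths.getD c 0) ++ ['|'])) _ ?_) ?_
  · intro d c hc
    have hcn : c < n := List.mem_range.mp hc
    cases hit : is_title <;>
      simp only [hsrc, hit, Bool.false_eq_true, Bool.true_eq_false, if_true, if_false] <;>
      rw [List.append_assoc, hwgetD c hcn]
  · rw [PySem.List.foldl_append_eq_flatMap, List.append_assoc, intercalate_bar _ hcne, hcells,
      List.flatMap_map]
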